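-- pv_equiv track=rewrite | github.com/DavidRiveraRvD/UVa-Online-Judge | BASICO/ARENAS/RECURSION AND LISTS/20180104.py | evaluador
-- ===== SOURCE A (Python) =====
-- def evaluador(var, x, i):
--     """Aqui el numero entra para ser evaluado, tantas veces sea necesario para
--     ser recurrente y para que la funcion principal lo evalue"""
--
--     if len(var)==1:
--         return int(var)
--     else:
--         if len(var) == i:
--             return(evaluador(str(x), 1, 0))
--         else:
--             x *= int(var[i])
--
--             return(evaluador(var, x, i+1))
-- ===== SOURCE B (Python) =====
-- def evaluador(var, x, i):
--     """Same result as A, without recursion: scan the digits from index i with an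
--     explicit index loop, then reduce by repeated digit products to a single digit."""
--     if len(var) == 1:
--         return int(var)
--     n = x
--     j = i
--     while j != len(var):
--         n *= int(var[j])
--         j += 1
--     while n >= 10:
--         p = 1
--         for c in str(n):
--             p *= int(c)
--         n = p
--     return n
-- ===== Notes on version B (the rewrite author's own statement) =====
-- stated objective: simpler
-- what changed: Replaces the self-recursive scan-and-restart with two explicit while loops: an index loop multiplying the digits from position i, then an iterative digit-product reduction repeated until a single digit remains.
import Mathlib
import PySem

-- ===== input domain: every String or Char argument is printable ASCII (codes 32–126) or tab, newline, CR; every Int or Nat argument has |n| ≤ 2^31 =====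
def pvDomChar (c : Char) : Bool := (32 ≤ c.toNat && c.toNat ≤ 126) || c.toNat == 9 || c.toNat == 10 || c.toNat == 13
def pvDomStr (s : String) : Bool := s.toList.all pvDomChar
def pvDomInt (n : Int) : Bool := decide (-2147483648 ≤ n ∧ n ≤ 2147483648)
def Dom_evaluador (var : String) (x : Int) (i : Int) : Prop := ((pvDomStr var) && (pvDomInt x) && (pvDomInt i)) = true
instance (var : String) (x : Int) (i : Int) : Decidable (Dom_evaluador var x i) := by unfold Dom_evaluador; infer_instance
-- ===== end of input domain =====

-- B replaces A's scan-and-restart recursion by two explicit while loops (an index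
-- scan multiplying the digits, then iterated digit-product reduction); equal return
-- values on Pre_.

-- ===== PORT A =====
-- helper the port cites for termination of its pass step (var[i] in range ⇒ i < len)
theorem pyGet?_lt_len (var : String) (i : Int) (c : Char)
    (h : PySem.Str.pyGet? var i = some c) : i < (var.toList.length : Int) := by
  by_cases hr : PySem.Raise.InRange var.toList.length i
  · exact hr.2
  · rw [show PySem.Str.pyGet? var i = PySem.List.pyGet? var.toList i from rfl,
        (PySem.List.pyGet?_eq_none_iff var.toList i).mpr hr] at h
    cases h

-- A's restart call evaluador(str(x), 1, 0) is guarded by fuel (the pass calls are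
-- structural in len(var) - i); everything else is a literal transliteration of A.
def evalA (fuel : Nat) (var : String) (x : Int) (i : Int) : Int :=
  if PySem.Str.len var = 1 then (PySem.Int.ofStr? var).getD 0     -- return int(var)
  else if PySem.Str.len var = i then
    (match fuel with
     | 0 => 0
     | f + 1 => evalA f (PySem.Int.toStr x) 1 0)                  -- evaluador(str(x), 1, 0)
  else
    match hg : PySem.Str.pyGet? var i with
    | none => 0                                                    -- IndexError, outside Pre_
    | some c => evalA fuel var (x * ((PySem.Int.ofChars? [c]).getD 0)) (i + 1)
                                                                   -- x *= int(var[i]); recurse i+1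
termination_by (fuel, ((PySem.Str.len var) - i).toNat)
decreasing_by
  · exact Prod.Lex.left _ _ (Nat.lt_succ_self _)
  · apply Prod.Lex.right
    have := pyGet?_lt_len var i c hg
    simp only [PySem.Str.len_eq] at *
    omega

def evaluador (var : String) (x : Int) (i : Int) : Int :=
  evalA 1000000 var x i

-- ===== PORT B =====
-- p *= int(c) over a list of characters (the body of B's for-loop; also what B's
-- index loop multiplies step by step)
def digitsProd (n0 : Int) (cs : List Char) : Int :=
  cs.foldl (fun n c => n * ((PySem.Int.ofChars? [c]).getD 0)) n0

-- B's first while loop: n *= int(var[j]); j += 1 until j == len(var)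
def scanB (var : String) (n : Int) (j : Int) : Int :=
  if PySem.Str.len var = j then n
  else
    match hg : PySem.Str.pyGet? var j with
    | none => 0                                                    -- IndexError, outside Pre_
    | some c => scanB var (n * ((PySem.Int.ofChars? [c]).getD 0)) (j + 1)
termination_by ((PySem.Str.len var) - j).toNat
decreasing_by
  have := pyGet?_lt_len var j c hg
  simp only [PySem.Str.len_eq] at *
  omega

-- B's second while loop, fuel-guarded
def persistB (fuel : Nat) (n : Int) : Int :=
  if 10 ≤ n then
    match fuel with
    | 0 => 0
    | f + 1 => persistB f (digitsProd 1 (PySem.Int.toStr n).toList)  -- p = 1; for c in str(n): p *= int(c)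
  else n

def evaluador_alt (var : String) (x : Int) (i : Int) : Int :=
  if PySem.Str.len var = 1 then (PySem.Int.ofStr? var).getD 0
  else persistB 999999 (scanB var x i)

-- ===== PRECONDITION & SPEC =====
-- Pre_ holds exactly where A returns normally: everything excluded is an input on
-- which A raises (a non-digit character reaching int(), an index outside the string,
-- or a negative running product whose str() reaches int('-')).
def Pre_evaluador (var : String) (x : Int) (i : Int) : Prop :=
  (var.toList.length = 1 ∧ var.toList.all Char.isDigit = true) ∨
  (var.toList.length ≠ 1 ∧ 0 ≤ i ∧ i ≤ (var.toList.length : Int) ∧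
    (var.toList.drop i.toNat).all Char.isDigit = true ∧
    (0 ≤ x ∨ '0' ∈ var.toList.drop i.toNat)) ∨
  (var.toList.length ≠ 1 ∧ -(var.toList.length : Int) ≤ i ∧ i < 0 ∧
    var.toList.all Char.isDigit = true ∧ (0 ≤ x ∨ '0' ∈ var.toList))
instance (var : String) (x : Int) (i : Int) : Decidable (Pre_evaluador var x i) := by
  unfold Pre_evaluador; infer_instance

def pvWitness_evaluador : String × Int × Int := ("39", 1, 0)

def Spec_evaluador (var : String) (x : Int) (i : Int) (out : Int) : Prop := out = evaluador_alt var x i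
instance (var : String) (x : Int) (i : Int) (out : Int) : Decidable (Spec_evaluador var x i out) := by unfold Spec_evaluador; infer_instance

-- ===== CLAIM (what is proved, stated in full; the proofs are below) =====
def Claim_equal_evaluador : Prop := ∀ (var : String) (x : Int) (i : Int), Dom_evaluador var x i → Pre_evaluador var x i → Spec_evaluador var x i (evaluador var x i)

-- ===== LEMMAS AND PROOFS =====

-- every digit char is one of '0'..'9'
theorem digit_char_cases (c : Char) (h : c.isDigit = true) :
    c ∈ ['0','1','2','3','4','5','6','7','8','9'] := by
  have hb : 48 ≤ c.toNat ∧ c.toNat ≤ 57 := by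
    simp [Char.isDigit] at h
    exact ⟨h.1, h.2⟩
  have hc := Char.ofNat_toNat c
  obtain ⟨hb1, hb2⟩ := hb
  set n := c.toNat with hn
  interval_cases n <;> (rw [← hc]; decide)

-- int(c) of a digit char is its value, in particular nonnegative
theorem digit_val_nonneg (c : Char) (h : c.isDigit = true) :
    0 ≤ (PySem.Int.ofChars? [c]).getD 0 := by
  have hm := digit_char_cases c h
  fin_cases hm <;> decide

-- str(n) of a nonnegative n consists of digit chars
theorem digitChar_isDigit (m : Nat) (hm : m < 10) : (Nat.digitChar m).isDigit = true := by
  interval_cases m <;> decide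

theorem toDigitsCore_digits : ∀ (f n : Nat) (acc : List Char),
    (∀ c ∈ acc, c.isDigit = true) → ∀ c ∈ Nat.toDigitsCore 10 f n acc, c.isDigit = true := by
  intro f
  induction f with
  | zero => intro n acc hacc c hc; rw [Nat.toDigitsCore] at hc; exact hacc c hc
  | succ f ih =>
    intro n acc hacc c hc
    rw [Nat.toDigitsCore] at hc
    have hacc' : ∀ c ∈ (n % 10).digitChar :: acc, c.isDigit = true := by
      intro c hc
      rcases List.mem_cons.mp hc with h | h
      · rw [h]; exact digitChar_isDigit _ (Nat.mod_lt _ (by norm_num))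
      · exact hacc c h
    split at hc
    · exact hacc' c hc
    · exact ih (n / 10) _ hacc' c hc

theorem toChars_eq_toDigits (x : Int) (hx : 0 ≤ x) :
    PySem.Int.toChars x = Nat.toDigits 10 x.toNat := by
  rw [PySem.Int.toChars, if_neg (by omega)]

theorem toStr_digits (x : Int) (hx : 0 ≤ x) :
    ∀ c ∈ (PySem.Int.toStr x).toList, c.isDigit = true := by
  intro c hc
  rw [PySem.Int.toList_toStr, toChars_eq_toDigits x hx, Nat.toDigits] at hc
  exact toDigitsCore_digits _ _ [] (by intro c hc; cases hc) c hc

-- length facts about str(n)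
theorem toDigitsCore_len_lt : ∀ (f n : Nat) (acc : List Char), 0 < f →
    acc.length < (Nat.toDigitsCore 10 f n acc).length := by
  intro f
  induction f with
  | zero => intro n acc h; cases h
  | succ f ih =>
    intro n acc _
    rw [Nat.toDigitsCore]
    split
    · simp
    · calc acc.length < ((n % 10).digitChar :: acc).length := by simp
        _ ≤ _ := by
          rcases Nat.eq_zero_or_pos f with hf | hf
          · subst hf; rw [Nat.toDigitsCore]
          · exact le_of_lt (ih (n / 10) _ hf)

theorem toStr_len_two (x : Int) (hx : 10 ≤ x) : 2 ≤ (PySem.Int.toStr x).toList.length := by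
  rw [PySem.Int.toList_toStr, toChars_eq_toDigits x (by omega), Nat.toDigits, Nat.toDigitsCore]
  have hdiv : ¬ x.toNat / 10 = 0 := by omega
  rw [if_neg hdiv]
  have h := toDigitsCore_len_lt x.toNat (x.toNat / 10) [(x.toNat % 10).digitChar] (by omega)
  simpa using h

-- single-digit round trip: str(x) has length 1 and int(str(x)) = x for 0 ≤ x < 10
theorem toStr_small_len (x : Int) (h0 : 0 ≤ x) (h9 : x < 10) :
    (PySem.Int.toChars x).length = 1 := by
  interval_cases x <;> decide

theorem toStr_small_roundtrip (x : Int) (h0 : 0 ≤ x) (h9 : x < 10) :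
    PySem.Int.ofStr? (PySem.Int.toStr x) = some x := by
  interval_cases x <;> decide

-- A with exhausted fuel returns the guard default on any non-single-char input
theorem evalA_zero (var : String) (x i : Int)
    (h1 : var.toList.length ≠ 1) (h2 : 0 ≤ i) : evalA 0 var x i = 0 := by
  rw [evalA.eq_def]
  rw [if_neg (by simp only [PySem.Str.len_eq]; exact_mod_cast h1)]
  by_cases h2' : PySem.Str.len var = i
  · rw [if_pos h2']
  · rw [if_neg h2']
    split
    · rfl
    · rename_i c hg
      exact evalA_zero var _ (i + 1) h1 (by omega)
termination_by ((var.toList.length : Int) - i).toNat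
decreasing_by
  have hlt := pyGet?_lt_len var i _ (by assumption)
  omega

-- A's pass over var[i:] multiplies the remaining digits into x, then restarts;
-- hrestart abstracts what the restart computes
theorem evalA_pass (f : Nat) (var : String) (x i : Int)
    (hd : ∀ c ∈ var.toList.drop i.toNat, c.isDigit = true)
    (h1 : var.toList.length ≠ 1)
    (hi0 : 0 ≤ i) (hile : i ≤ (var.toList.length : Int))
    (hx : 0 ≤ x ∨ '0' ∈ var.toList.drop i.toNat)
    (hrestart : ∀ y : Int, 0 ≤ y → evalA f (PySem.Int.toStr y) 1 0 = persistB f y) :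
    evalA (f + 1) var x i = persistB f (digitsProd x (var.toList.drop i.toNat)) := by
  rw [evalA.eq_def]
  rw [if_neg (by simp only [PySem.Str.len_eq]; exact_mod_cast h1)]
  by_cases h2 : PySem.Str.len var = i
  · -- restart: evaluador(str(x), 1, 0)
    rw [if_pos h2]
    have hieq : i.toNat = var.toList.length := by
      simp only [PySem.Str.len_eq] at h2; omega
    have hdrop : var.toList.drop i.toNat = [] := by rw [hieq, List.drop_length]
    have hx0 : 0 ≤ x := by
      rcases hx with h | h
      · exact h
      · rw [hdrop] at h; cases h
    rw [hdrop]
    exact hrestart x hx0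
  · -- pass: x *= int(var[i]); i += 1
    rw [if_neg h2]
    have hlt : i < (var.toList.length : Int) := by
      simp only [PySem.Str.len_eq] at h2
      exact lt_of_le_of_ne hile (fun hh => h2 hh.symm)
    have hlt' : i.toNat < var.toList.length := by omega
    have hgeteq : PySem.Str.pyGet? var i = some (var.toList[i.toNat]) := by
      have h0 := PySem.Str.pyGet?_natCast var i.toNat
      rw [show ((i.toNat : Nat) : Int) = i by omega] at h0
      rw [h0, List.getElem?_eq_getElem hlt']
    split
    · rename_i hg
      rw [hgeteq] at hg; cases hg
    · rename_i c hg
      have hc : c = var.toList[i.toNat] := by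
        rw [hgeteq] at hg; exact (Option.some.inj hg).symm
      have hdropc : var.toList.drop i.toNat = c :: var.toList.drop (i.toNat + 1) := by
        rw [hc]; exact List.drop_eq_getElem_cons hlt'
      have hcd : c.isDigit = true := hd c (by rw [hdropc]; exact List.mem_cons_self ..)
      have hd0 : 0 ≤ (PySem.Int.ofChars? [c]).getD 0 := digit_val_nonneg c hcd
      have hd' : ∀ c' ∈ var.toList.drop (i + 1).toNat, c'.isDigit = true := by
        intro c' hc'
        apply hd c'
        rw [hdropc]
        rw [show (i + 1).toNat = i.toNat + 1 by omega] at hc'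
        exact List.mem_cons_of_mem _ hc'
      have hx' : 0 ≤ x * ((PySem.Int.ofChars? [c]).getD 0) ∨
          '0' ∈ var.toList.drop (i + 1).toNat := by
        rcases hx with h | h
        · exact Or.inl (mul_nonneg h hd0)
        · rw [hdropc] at h
          rcases List.mem_cons.mp h with h | h
          · left
            rw [← h]
            simp [show (PySem.Int.ofChars? ['0']).getD 0 = 0 from by decide]
          · right
            rw [show (i + 1).toNat = i.toNat + 1 by omega]
            exact h
      have hrec := evalA_pass f var (x * ((PySem.Int.ofChars? [c]).getD 0)) (i + 1) hd' h1
        (by omega) (by omega) hx' hrestart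
      rw [hrec, hdropc, show (i + 1).toNat = i.toNat + 1 by omega]
      rfl
termination_by ((var.toList.length : Int) - i).toNat
decreasing_by omega

-- what the restart computes: B's while-loop, by induction on the shared fuel
theorem evalA_restart (f : Nat) :
    ∀ y : Int, 0 ≤ y → evalA f (PySem.Int.toStr y) 1 0 = persistB f y := by
  induction f with
  | zero =>
    intro y hy
    by_cases hy10 : y < 10
    · rw [evalA.eq_def,
        if_pos (by simp [PySem.Str.len_eq, toStr_small_len y hy hy10]),
        toStr_small_roundtrip y hy hy10]
      rw [persistB, if_neg (by omega)]
      rfl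
    · rw [evalA_zero (PySem.Int.toStr y) 1 0 (by have := toStr_len_two y (by omega); omega) le_rfl]
      rw [persistB, if_pos (by omega)]
  | succ f ih =>
    intro y hy
    by_cases hy10 : y < 10
    · rw [evalA.eq_def,
        if_pos (by simp [PySem.Str.len_eq, toStr_small_len y hy hy10]),
        toStr_small_roundtrip y hy hy10]
      rw [persistB, if_neg (by omega)]
      rfl
    · have hlen2 := toStr_len_two y (by omega)
      have hpass := evalA_pass f (PySem.Int.toStr y) 1 0
        (fun c hc => toStr_digits y hy c (List.mem_of_mem_drop hc))
        (by omega) le_rfl (by exact_mod_cast Nat.zero_le _) (Or.inl (by norm_num)) ih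
      rw [hpass, persistB, if_pos (by omega)]
      rfl

-- the main invariant: one unit of A-fuel ahead, A's recursion computes B's two loops
theorem evalA_eq (f : Nat) (var : String) (x i : Int)
    (hp : (var.toList.length = 1 ∧ var.toList.all Char.isDigit = true) ∨
      (var.toList.length ≠ 1 ∧ 0 ≤ i ∧ i ≤ (var.toList.length : Int) ∧
        (var.toList.drop i.toNat).all Char.isDigit = true ∧
        (0 ≤ x ∨ '0' ∈ var.toList.drop i.toNat))) :
    evalA (f + 1) var x i =
      if var.toList.length = 1 then (PySem.Int.ofStr? var).getD 0
      else persistB f (digitsProd x (var.toList.drop i.toNat)) := by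
  rcases hp with ⟨h1, _⟩ | ⟨h1, hi0, hile, hda, hx⟩
  · rw [if_pos h1, evalA.eq_def, if_pos (by simp [PySem.Str.len_eq, h1])]
  · rw [if_neg h1]
    exact evalA_pass f var x i (List.all_eq_true.mp hda) h1 hi0 hile hx (evalA_restart f)

-- a nonnegative seed times digit values stays nonnegative
theorem digitsProd_nonneg (x : Int) (cs : List Char) (hx : 0 ≤ x)
    (hd : ∀ c ∈ cs, c.isDigit = true) : 0 ≤ digitsProd x cs := by
  induction cs generalizing x with
  | nil => exact hx
  | cons c t ih =>
    rw [show digitsProd x (c :: t) =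
      digitsProd (x * ((PySem.Int.ofChars? [c]).getD 0)) t from rfl]
    exact ih _ (mul_nonneg hx (digit_val_nonneg c (hd c (List.mem_cons_self ..))))
      (fun c' hc' => hd c' (List.mem_cons_of_mem _ hc'))

-- A on a negative index: the wrapped-in trailing digits are multiplied into x,
-- then the scan continues from index 0
theorem evalA_neg (fu : Nat) (var : String) (x i : Int)
    (h1 : var.toList.length ≠ 1)
    (hge : -(var.toList.length : Int) ≤ i) (hlt : i < 0) :
    evalA fu var x i =
      evalA fu var (digitsProd x (var.toList.drop ((var.toList.length : Int) + i).toNat)) 0 := by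
  have hlen : 0 < var.toList.length := by omega
  have hidx : ((var.toList.length : Int) + i).toNat < var.toList.length := by omega
  rw [evalA.eq_def]
  rw [if_neg (by simp only [PySem.Str.len_eq]; exact_mod_cast h1),
      if_neg (by simp only [PySem.Str.len_eq]; omega)]
  have hget : PySem.Str.pyGet? var i =
      some (var.toList[((var.toList.length : Int) + i).toNat]) := by
    have hget0 := PySem.List.pyGet?_neg_natCast var.toList (-i).toNat (by omega) (by omega)
    rw [show -(((-i).toNat : Nat) : Int) = i from by omega] at hget0
    show PySem.List.pyGet? var.toList i = _
    rw [hget0, show var.toList.length - (-i).toNat =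
        ((var.toList.length : Int) + i).toNat from by omega]
    exact List.getElem?_eq_getElem hidx
  split
  · rename_i hg
    rw [hget] at hg; cases hg
  · rename_i c hg
    have hc : c = var.toList[((var.toList.length : Int) + i).toNat] := by
      rw [hget] at hg; exact (Option.some.inj hg).symm
    have hdropc : var.toList.drop ((var.toList.length : Int) + i).toNat =
        c :: var.toList.drop (((var.toList.length : Int) + i).toNat + 1) := by
      rw [hc]; exact List.drop_eq_getElem_cons hidx
    have hstep : digitsProd x (var.toList.drop ((var.toList.length : Int) + i).toNat) =
        digitsProd (x * ((PySem.Int.ofChars? [c]).getD 0))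
          (var.toList.drop (((var.toList.length : Int) + (i + 1))).toNat) := by
      rw [hdropc, show ((var.toList.length : Int) + (i + 1)).toNat =
        ((var.toList.length : Int) + i).toNat + 1 by omega]
      rfl
    rw [hstep]
    by_cases hi1 : i + 1 = 0
    · rw [hi1, show ((var.toList.length : Int) + 0).toNat = var.toList.length by omega,
          List.drop_length]
      rfl
    · exact evalA_neg fu var (x * ((PySem.Int.ofChars? [c]).getD 0)) (i + 1) h1
        (by omega) (by omega)
termination_by (-i).toNat
decreasing_by omega

-- B's index loop from a nonnegative index is the digit product of the suffix
theorem scanB_nonneg (var : String) (n j : Int)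
    (hj0 : 0 ≤ j) (hjle : j ≤ (var.toList.length : Int)) :
    scanB var n j = digitsProd n (var.toList.drop j.toNat) := by
  rw [scanB.eq_def]
  by_cases h2 : PySem.Str.len var = j
  · rw [if_pos h2]
    have : var.toList.drop j.toNat = [] := by
      rw [show j.toNat = var.toList.length by simp only [PySem.Str.len_eq] at h2; omega,
          List.drop_length]
    rw [this]
    rfl
  · rw [if_neg h2]
    have hlt : j < (var.toList.length : Int) := by
      simp only [PySem.Str.len_eq] at h2
      exact lt_of_le_of_ne hjle (fun hh => h2 hh.symm)
    have hlt' : j.toNat < var.toList.length := by omega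
    have hget : PySem.Str.pyGet? var j = some (var.toList[j.toNat]) := by
      have h0 := PySem.Str.pyGet?_natCast var j.toNat
      rw [show ((j.toNat : Nat) : Int) = j by omega] at h0
      rw [h0, List.getElem?_eq_getElem hlt']
    split
    · rename_i hg
      rw [hget] at hg; cases hg
    · rename_i c hg
      have hc : c = var.toList[j.toNat] := by
        rw [hget] at hg; exact (Option.some.inj hg).symm
      have hdropc : var.toList.drop j.toNat = c :: var.toList.drop (j.toNat + 1) := by
        rw [hc]; exact List.drop_eq_getElem_cons hlt'
      rw [scanB_nonneg var (n * ((PySem.Int.ofChars? [c]).getD 0)) (j + 1)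
            (by omega) (by omega),
          hdropc, show (j + 1).toNat = j.toNat + 1 by omega]
      rfl
termination_by ((var.toList.length : Int) - j).toNat
decreasing_by omega

-- B's index loop from a negative index wraps in the trailing digits, then
-- continues from index 0 (exactly as A does)
theorem scanB_neg (var : String) (n j : Int)
    (h1 : var.toList.length ≠ 1)
    (hge : -(var.toList.length : Int) ≤ j) (hlt : j < 0) :
    scanB var n j =
      scanB var (digitsProd n (var.toList.drop ((var.toList.length : Int) + j).toNat)) 0 := by
  have hlen : 0 < var.toList.length := by omega
  have hidx : ((var.toList.length : Int) + j).toNat < var.toList.length := by omega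
  rw [scanB.eq_def]
  rw [if_neg (by simp only [PySem.Str.len_eq]; omega)]
  have hget : PySem.Str.pyGet? var j =
      some (var.toList[((var.toList.length : Int) + j).toNat]) := by
    have hget0 := PySem.List.pyGet?_neg_natCast var.toList (-j).toNat (by omega) (by omega)
    rw [show -(((-j).toNat : Nat) : Int) = j from by omega] at hget0
    show PySem.List.pyGet? var.toList j = _
    rw [hget0, show var.toList.length - (-j).toNat =
        ((var.toList.length : Int) + j).toNat from by omega]
    exact List.getElem?_eq_getElem hidx
  split
  · rename_i hg
    rw [hget] at hg; cases hg
  · rename_i c hg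
    have hc : c = var.toList[((var.toList.length : Int) + j).toNat] := by
      rw [hget] at hg; exact (Option.some.inj hg).symm
    have hdropc : var.toList.drop ((var.toList.length : Int) + j).toNat =
        c :: var.toList.drop (((var.toList.length : Int) + j).toNat + 1) := by
      rw [hc]; exact List.drop_eq_getElem_cons hidx
    have hstep : digitsProd n (var.toList.drop ((var.toList.length : Int) + j).toNat) =
        digitsProd (n * ((PySem.Int.ofChars? [c]).getD 0))
          (var.toList.drop (((var.toList.length : Int) + (j + 1))).toNat) := by
      rw [hdropc, show ((var.toList.length : Int) + (j + 1)).toNat =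
        ((var.toList.length : Int) + j).toNat + 1 by omega]
      rfl
    rw [hstep]
    by_cases hj1 : j + 1 = 0
    · rw [hj1, show ((var.toList.length : Int) + 0).toNat = var.toList.length by omega,
          List.drop_length]
      rfl
    · exact scanB_neg var (n * ((PySem.Int.ofChars? [c]).getD 0)) (j + 1) h1
        (by omega) (by omega)
termination_by (-j).toNat
decreasing_by omega

-- ===== VERDICT (by name: the statement is the Claim_ definition above) =====
theorem evaluador_spec : Claim_equal_evaluador := by
  intro var x i _hDom hPre
  show evaluador var x i = evaluador_alt var x i
  rcases hPre with hp | hp | ⟨h1, hge, hlt, hall, hx⟩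
  · rw [show evaluador var x i = evalA (999999 + 1) var x i from rfl,
        evalA_eq 999999 var x i (Or.inl hp)]
    unfold evaluador_alt
    simp [hp.1, PySem.Str.len_eq]
  · rw [show evaluador var x i = evalA (999999 + 1) var x i from rfl,
        evalA_eq 999999 var x i (Or.inr hp)]
    unfold evaluador_alt
    obtain ⟨h1, hi0, hile, _⟩ := hp
    rw [if_neg h1, if_neg (by simp only [PySem.Str.len_eq]; exact_mod_cast h1),
        scanB_nonneg var x i hi0 hile]
  · -- negative start index: both sides wrap in the trailing digits, then scan from 0
    have hL0 : (0 : Int) ≤ (var.toList.length : Int) := by exact_mod_cast Nat.zero_le _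
    have hx0 : 0 ≤ digitsProd x (var.toList.drop ((var.toList.length : Int) + i).toNat) ∨
        '0' ∈ var.toList.drop ((0 : Int)).toNat := by
      rcases hx with h | h
      · exact Or.inl (digitsProd_nonneg x _ h
          (fun c hc => List.all_eq_true.mp hall c (List.mem_of_mem_drop hc)))
      · right
        rw [show ((0 : Int)).toNat = 0 from rfl, List.drop_zero]
        exact h
    rw [show evaluador var x i = evalA 1000000 var x i from rfl,
        evalA_neg 1000000 var x i h1 hge hlt,
        show (1000000 : Nat) = 999999 + 1 from rfl,
        evalA_eq 999999 var _ 0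
          (Or.inr ⟨h1, le_refl 0, hL0, by simpa using hall, hx0⟩),
        if_neg h1]
    unfold evaluador_alt
    rw [if_neg (by simp only [PySem.Str.len_eq]; exact_mod_cast h1),
        scanB_neg var x i h1 hge hlt,
        scanB_nonneg var _ 0 (le_refl 0) hL0]
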